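-- pv_equiv track=rewrite | github.com/jatman2002/UoB.Y4.Dissertation | src/dataset-related-code/existing.py | get_wasted_slots
-- ===== SOURCE A (Python) =====
-- def get_wasted_slots(diary):
--         min_booking_length = 6
--         wasted_count = 0
--         for table in diary:
--             empty_slots = 0
--             for slot in table:
--                 if slot != None:
--                     if empty_slots < min_booking_length and empty_slots > 0:
--                         wasted_count += 1
--                     empty_slots = 0
--                     continue
--                 empty_slots += 1
--
--         return wasted_count
-- ===== SOURCE B (Python) =====
-- def _runs(table):
--     # maximal runs of consecutive slots with equal booked-ness, as (booked, length)
--     res = []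
--     i = 0
--     n = len(table)
--     while i < n:
--         k = table[i] is not None
--         j = i + 1
--         while j < n and (table[j] is not None) == k:
--             j += 1
--         res.append((k, j - i))
--         i = j
--     return res
--
-- def get_wasted_slots(diary):
--     total = 0
--     for table in diary:
--         rs = _runs(table)
--         for (k, n) in rs[:-1]:  # a run that is not last is followed by a run of the other kind
--             if not k and n < 6:
--                 total += 1
--     return total
-- ===== Notes on version B (the rewrite author's own statement) =====
-- stated objective: alternative
-- what changed: B first materializes each table as a list of maximal (booked, length) runs and then counts non-final empty runs of length < 6, replacing A's inline empty-slot counter that is reset on every booked slot.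
import Mathlib
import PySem

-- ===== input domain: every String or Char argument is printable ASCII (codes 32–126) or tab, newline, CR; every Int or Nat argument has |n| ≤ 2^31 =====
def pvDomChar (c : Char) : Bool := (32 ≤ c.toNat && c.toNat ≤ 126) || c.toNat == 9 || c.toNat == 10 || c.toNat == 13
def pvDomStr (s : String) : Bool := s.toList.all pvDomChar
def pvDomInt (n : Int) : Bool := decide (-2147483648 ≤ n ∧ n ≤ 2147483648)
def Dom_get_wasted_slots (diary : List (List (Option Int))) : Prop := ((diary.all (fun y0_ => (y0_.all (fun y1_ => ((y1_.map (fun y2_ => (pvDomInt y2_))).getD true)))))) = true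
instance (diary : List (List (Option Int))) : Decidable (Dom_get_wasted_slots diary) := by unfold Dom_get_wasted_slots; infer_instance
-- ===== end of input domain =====

-- B replaces A's inline empty-slot counter by an explicit run-list decomposition; objective: alternative.

-- ===== PORT A =====
-- inner-loop body of A: state = (wasted_count, empty_slots)
def pvStepA (s : Int × Int) (slot : Option Int) : Int × Int :=
  if slot ≠ none then
    (if s.2 < 6 ∧ s.2 > 0 then s.1 + 1 else s.1, 0)
  else (s.1, s.2 + 1)

def get_wasted_slots (diary : List (List (Option Int))) : Int :=
  diary.foldl (fun wasted_count table => (table.foldl pvStepA (wasted_count, 0)).1) 0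

-- ===== PORT B =====
-- the while loops of _runs: consume one maximal run of equal booked-ness at a time
def pvRunsB : List (Option Int) → List (Bool × Int)
  | [] => []
  | x :: t =>
    let k := x.isSome
    (k, (t.takeWhile (fun y => y.isSome == k)).length + 1) ::
      pvRunsB (t.dropWhile (fun y => y.isSome == k))
termination_by l => l.length
decreasing_by
  simpa using Nat.lt_succ_of_le (List.length_dropWhile_le _ _)

-- body of B's counting loop over rs[:-1]
def pvStepB (t : Int) (kn : Bool × Int) : Int :=
  if kn.1 = false ∧ kn.2 < 6 then t + 1 else t

def get_wasted_slots_alt (diary : List (List (Option Int))) : Int :=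
  diary.foldl (fun total table => ((pvRunsB table).dropLast).foldl pvStepB total) 0

-- ===== PRECONDITION & SPEC =====
def Spec_get_wasted_slots (diary : List (List (Option Int))) (out : Int) : Prop := out = get_wasted_slots_alt diary
instance (diary : List (List (Option Int))) (out : Int) : Decidable (Spec_get_wasted_slots diary out) := by unfold Spec_get_wasted_slots; infer_instance

-- ===== CLAIM (what is proved, stated in full; the proofs are below) =====
def Claim_equal_get_wasted_slots : Prop := ∀ (diary : List (List (Option Int))), Dom_get_wasted_slots diary → Spec_get_wasted_slots diary (get_wasted_slots diary)

-- ===== LEMMAS AND PROOFS =====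

theorem pvFoldB_add (l : List (Bool × Int)) (a : Int) :
    l.foldl pvStepB a = a + l.foldl pvStepB 0 := by
  induction l generalizing a with
  | nil => simp
  | cons p t ih =>
    simp only [List.foldl_cons]
    rw [ih (pvStepB a p), ih (pvStepB 0 p)]
    unfold pvStepB; split_ifs <;> ring

theorem pvFoldA_some_run (pre : List (Option Int)) (h : ∀ y ∈ pre, y.isSome) (w : Int) :
    pre.foldl pvStepA (w, 0) = (w, 0) := by
  induction pre with
  | nil => rfl
  | cons y t ih =>
    have hy : y.isSome := h y (by simp)
    obtain ⟨v, rfl⟩ := Option.isSome_iff_exists.mp hy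
    simp only [List.foldl_cons]
    have : pvStepA (w, 0) (some v) = (w, 0) := by simp [pvStepA]
    rw [this]
    exact ih (fun z hz => h z (by simp [hz]))

theorem pvFoldA_none_run (pre : List (Option Int)) (h : ∀ y ∈ pre, y = none) (w e : Int) :
    pre.foldl pvStepA (w, e) = (w, e + pre.length) := by
  induction pre generalizing e with
  | nil => simp
  | cons y t ih =>
    have hy : y = none := h y (by simp)
    subst hy
    simp only [List.foldl_cons]
    have : pvStepA (w, e) none = (w, e + 1) := by simp [pvStepA]
    rw [this, ih (fun z hz => h z (by simp [hz]))]
    simp only [Prod.mk.injEq, List.length_cons]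
    exact ⟨trivial, by push_cast; ring⟩

-- B's per-table count
def pvCountB (table : List (Option Int)) : Int :=
  ((pvRunsB table).dropLast).foldl pvStepB 0

theorem pvRunsB_nil_iff (table : List (Option Int)) : pvRunsB table = [] ↔ table = [] := by
  cases table with
  | nil => simp [pvRunsB]
  | cons x t => simp [pvRunsB]

-- main per-table lemma
theorem pvTableL : ∀ (n : Nat) (table : List (Option Int)), table.length ≤ n →
    ∀ w : Int, (table.foldl pvStepA (w, 0)).1 = w + pvCountB table := by
  intro n
  induction n with
  | zero =>
    intro table hlen w
    have : table = [] := List.length_eq_zero_iff.mp (Nat.le_zero.mp hlen)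
    subst this; simp [pvCountB, pvRunsB]
  | succ n ih =>
    intro table hlen w
    cases table with
    | nil => simp [pvCountB, pvRunsB]
    | cons x t =>
      have hpre : ∀ y ∈ t.takeWhile (fun y => y.isSome == x.isSome), y.isSome = x.isSome := by
        intro y hy
        simpa using List.mem_takeWhile_imp hy
      have hsplit : t = t.takeWhile (fun y => y.isSome == x.isSome) ++
          t.dropWhile (fun y => y.isSome == x.isSome) := (List.takeWhile_append_dropWhile).symm
      have hrestlen : (t.dropWhile (fun y => y.isSome == x.isSome)).length ≤ n := by
        have := List.length_dropWhile_le (fun y => y.isSome == x.isSome) t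
        simp at hlen; omega
      set pre := t.takeWhile (fun y => y.isSome == x.isSome) with hpredef
      set rest := t.dropWhile (fun y => y.isSome == x.isSome) with hrestdef
      have hruns : pvRunsB (x :: t) = (x.isSome, (pre.length : Int) + 1) :: pvRunsB rest := by
        rw [pvRunsB]
      cases hx : x.isSome with
      | true =>
        obtain ⟨v, rfl⟩ := Option.isSome_iff_exists.mp hx
        have hstep : pvStepA (w, 0) (some v) = (w, 0) := by simp [pvStepA]
        rw [List.foldl_cons, hstep]
        conv_lhs => rw [hsplit]
        rw [List.foldl_append, pvFoldA_some_run pre (fun y hy => by rw [hpre y hy, hx]) w]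
        rw [ih rest hrestlen w]
        -- count side: the booked head run contributes nothing
        cases hr : pvRunsB rest with
        | nil =>
          have : rest = [] := (pvRunsB_nil_iff rest).mp hr
          simp [pvCountB, hruns, hr, hx]
        | cons r rs =>
          have hcount : pvCountB (some v :: t) = pvCountB rest := by
            unfold pvCountB
            rw [hruns, hr, List.dropLast_cons₂, List.foldl_cons, ← hr]
            have : pvStepB 0 (Option.isSome (some v), (pre.length : Int) + 1) = 0 := by
              simp [pvStepB]
            rw [this]
          rw [hcount]
      | false =>
        have hxn : x = none := Option.not_isSome_iff_eq_none.mp (by simp [hx])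
        subst hxn
        have hstep : pvStepA (w, 0) none = (w, 1) := by simp [pvStepA]
        rw [List.foldl_cons, hstep]
        conv_lhs => rw [hsplit]
        have hprenone : ∀ y ∈ pre, y = none := by
          intro y hy
          exact Option.not_isSome_iff_eq_none.mp (by simp [hpre y hy, hx])
        rw [List.foldl_append, pvFoldA_none_run pre hprenone w 1]
        cases hr : rest with
        | nil =>
          have hrr : pvRunsB (none :: t) = [(false, (pre.length : Int) + 1)] := by
            rw [hruns, hr, hx]; simp [pvRunsB]
          simp [pvCountB, hrr]
        | cons y t2 =>
          -- the head of rest is booked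
          have hy : y.isSome = true := by
            by_contra hny
            have hyn : y = none := Option.not_isSome_iff_eq_none.mp (by simpa using hny)
            have h1 : rest.head? = some y := by rw [hr]; rfl
            have h2 := List.head?_dropWhile_not (p := fun z : Option Int => z.isSome == Option.isSome (none : Option Int)) (l := t)
            rw [← hrestdef, h1] at h2
            simp [hyn] at h2
          obtain ⟨v, rfl⟩ := Option.isSome_iff_exists.mp hy
          set m : Int := (pre.length : Int) + 1 with hm
          have hm1 : 1 ≤ m := by rw [hm]; omega
          set c : Int := if m < 6 then 1 else 0 with hc
          have hstep2 : pvStepA (w, m) (some v) = (w + c, 0) := by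
            unfold pvStepA
            rw [if_pos (by simp), hc]
            simp only [Prod.mk.injEq]
            refine ⟨?_, trivial⟩
            split_ifs with h1 h2 <;> omega
          have hstep3 : pvStepA (w + c, 0) (some v) = (w + c, 0) := by simp [pvStepA]
          have key : ((some v :: t2).foldl pvStepA (w, 1 + (pre.length : Int))).1
              = ((some v :: t2).foldl pvStepA (w + c, 0)).1 := by
            have : (1 : Int) + pre.length = m := by rw [hm]; ring
            rw [this, List.foldl_cons, List.foldl_cons, hstep2, hstep3]
          rw [key, ← hr, ih rest hrestlen (w + c)]
          have hcount : pvCountB (none :: t) = c + pvCountB rest := by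
            unfold pvCountB
            have hrne : pvRunsB rest ≠ [] := by
              rw [hr]; intro hcontra
              exact absurd ((pvRunsB_nil_iff _).mp hcontra) (by simp)
            cases hrr : pvRunsB rest with
            | nil => exact absurd hrr hrne
            | cons r rs =>
              rw [hruns, hrr, List.dropLast_cons₂, List.foldl_cons, ← hrr]
              have : pvStepB 0 (Option.isSome (none : Option Int), m) = c := by
                simp [pvStepB, hc]
              rw [this, pvFoldB_add]
          rw [hcount]; ring
      
theorem pvTable (table : List (Option Int)) (w : Int) :
    (table.foldl pvStepA (w, 0)).1 = w + pvCountB table :=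
  pvTableL table.length table le_rfl w

-- ===== VERDICT (by name: the statement is the Claim_ definition above) =====
theorem get_wasted_slots_spec : Claim_equal_get_wasted_slots := by
  intro diary hdom
  clear hdom
  unfold Spec_get_wasted_slots get_wasted_slots get_wasted_slots_alt
  suffices h : ∀ a : Int,
      diary.foldl (fun wasted_count table => (table.foldl pvStepA (wasted_count, 0)).1) a
        = diary.foldl (fun total table => ((pvRunsB table).dropLast).foldl pvStepB total) a by
    exact h 0
  induction diary with
  | nil => intro a; rfl
  | cons table rest ih =>
    intro a
    simp only [List.foldl_cons]
    rw [pvTable, pvFoldB_add]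
    have hfold : List.foldl pvStepB 0 (pvRunsB table).dropLast = pvCountB table := rfl
    rw [hfold]
    exact ih (a + pvCountB table)
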